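-- pv_equiv track=rewrite | github.com/unfaiyted/playlist-sync | src/actions/move_org_tv_to_destination.py | generate_name_variations
-- ===== SOURCE A (Python) =====
-- from itertools import product
--
-- def generate_name_variations(show_name):
--     words = show_name.lower().split()
--     variations = []
--
--     for i, word in enumerate(words):
--         if word == 'and':
--             variations.append((['and', '&'], i))
--         elif word == '&':
--             variations.append((['&', 'and'], i))
--         else:
--             variations.append(([word], i))
--
--     all_combinations = product(*[v[0] for v in variations])
--     return [' '.join(combo) for combo in all_combinations]
-- ===== SOURCE B (Python) =====
-- def generate_name_variations(show_name):
--     words = show_name.lower().split()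
--     toggles = [i for i, w in enumerate(words) if w == 'and' or w == '&']
--     t = len(toggles)
--     results = []
--     for mask in range(2 ** t):
--         cur = list(words)
--         for j, pos in enumerate(toggles):
--             if (mask >> (t - 1 - j)) & 1:
--                 cur[pos] = '&' if cur[pos] == 'and' else 'and'
--         results.append(' '.join(cur))
--     return results
-- ===== Notes on version B (the rewrite author's own statement) =====
-- stated objective: alternative
-- what changed: Replaces the itertools.product over per-word option lists with explicit binary enumeration: record the indices of 'and'/'&' tokens once, then for each mask in range(2**t) rebuild the word list, flipping the j-th toggle position when the corresponding bit (MSB-first) is set.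
import Mathlib
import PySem

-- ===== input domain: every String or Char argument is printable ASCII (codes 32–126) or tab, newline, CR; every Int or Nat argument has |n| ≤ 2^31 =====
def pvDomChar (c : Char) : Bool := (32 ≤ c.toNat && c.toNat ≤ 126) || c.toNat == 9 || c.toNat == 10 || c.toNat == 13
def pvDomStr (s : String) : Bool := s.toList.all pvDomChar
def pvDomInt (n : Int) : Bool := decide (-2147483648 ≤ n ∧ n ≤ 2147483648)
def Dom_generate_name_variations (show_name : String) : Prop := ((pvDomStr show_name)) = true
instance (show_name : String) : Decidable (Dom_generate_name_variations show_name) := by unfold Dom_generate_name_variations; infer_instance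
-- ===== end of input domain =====

-- B replaces itertools.product over per-word option lists by explicit binary enumeration
-- over just the 'and'/'&' positions (MSB-first masks); an alternative of the same cost.

-- ===== PORT A =====
-- itertools.product(*lists), transliterated recursively (leftmost list varies slowest)
def pyProdA : List (List String) → List (List String)
  | [] => [[]]
  | l :: ls => l.flatMap (fun x => (pyProdA ls).map (fun combo => x :: combo))

-- the body of A's 'for i, word in enumerate(words)' loop, verbatim
def aVarStep (acc : List (List String × Int)) (iw : Int × String) : List (List String × Int) :=
  if iw.2 = "and" then acc ++ [(["and", "&"], iw.1)]
  else if iw.2 = "&" then acc ++ [(["&", "and"], iw.1)]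
  else acc ++ [([iw.2], iw.1)]

def generate_name_variations (show_name : String) : List String :=
  let words := PySem.Str.split₀ (PySem.Str.lower show_name)
  let variations := (PySem.List.enumerate words 0).foldl aVarStep []
  (pyProdA (variations.map (·.1))).map (fun combo => PySem.Str.join " " combo)

-- ===== PORT B =====
-- the body of B's toggle-collecting comprehension, verbatim
def bTglStep (acc : List Int) (iw : Int × String) : List Int :=
  if iw.2 = "and" ∨ iw.2 = "&" then acc ++ [iw.1] else acc

-- the body of B's inner 'for j, pos in enumerate(toggles)' loop, verbatim;
-- (t - 1 - jp.1) is ≥ 0 wherever the loop runs, so .toNat is exact for Python's '>>'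
def bFlipStep (t mask : Int) (cur : List String) (jp : Int × Int) : List String :=
  if PySem.Int.band (mask >>> (t - 1 - jp.1).toNat) 1 ≠ 0 then
    PySem.List.pySetD cur jp.2
      (if PySem.List.pyGetD cur jp.2 "" = "and" then "&" else "and")
  else cur

def generate_name_variations_alt (show_name : String) : List String :=
  let words := PySem.Str.split₀ (PySem.Str.lower show_name)
  let toggles := (PySem.List.enumerate words 0).foldl bTglStep []
  let t : Int := PySem.List.len toggles
  (PySem.List.pyRange 0 (2 ^ t.toNat) 1).map (fun mask =>
    let cur := (PySem.List.enumerate toggles 0).foldl (bFlipStep t mask) words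
    PySem.Str.join " " cur)

-- ===== PRECONDITION & SPEC =====
def Spec_generate_name_variations (show_name : String) (out : List String) : Prop := out = generate_name_variations_alt show_name
instance (show_name : String) (out : List String) : Decidable (Spec_generate_name_variations show_name out) := by unfold Spec_generate_name_variations; infer_instance

-- ===== CLAIM (what is proved, stated in full; the proofs are below) =====
def Claim_equal_generate_name_variations : Prop := ∀ (show_name : String), Dom_generate_name_variations show_name → Spec_generate_name_variations show_name (generate_name_variations show_name)

-- ===== LEMMAS AND PROOFS =====

-- the option list A attaches to a word
def tokOpts (w : String) : List String :=
  if w = "and" then ["and", "&"] else if w = "&" then ["&", "and"] else [w]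

def flipTok (w : String) : String := if w = "and" then "&" else "and"

-- the common normal form of both programs' combination lists
def variants : List String → List (List String)
  | [] => [[]]
  | w :: ws =>
    if w = "and" ∨ w = "&"
      then (variants ws).map (fun c => w :: c) ++ (variants ws).map (fun c => flipTok w :: c)
      else (variants ws).map (fun c => w :: c)

def togglesOf : List String → Int → List Int
  | [], _ => []
  | w :: ws, s => if w = "and" ∨ w = "&" then s :: togglesOf ws (s + 1) else togglesOf ws (s + 1)

def countTok : List String → Nat
  | [] => 0
  | w :: ws => (if w = "and" ∨ w = "&" then 1 else 0) + countTok ws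

theorem foldl_aVarStep (l : List (Int × String)) (acc : List (List String × Int)) :
    l.foldl aVarStep acc = acc ++ l.map (fun iw => (tokOpts iw.2, iw.1)) := by
  induction l generalizing acc with
  | nil => simp
  | cons x l ih =>
    simp only [List.foldl_cons, List.map_cons, ih, aVarStep, tokOpts]
    split_ifs <;> simp

theorem pyProdA_map_tokOpts (ws : List String) : pyProdA (ws.map tokOpts) = variants ws := by
  induction ws with
  | nil => rfl
  | cons w ws ih =>
    simp only [List.map_cons, pyProdA, ih, variants, tokOpts, flipTok]
    by_cases h1 : w = "and"
    · simp [h1]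
    · by_cases h2 : w = "&"
      · simp [h1, h2]
      · simp [h1, h2]

theorem foldl_bTglStep (ws : List String) (s : Int) (acc : List Int) :
    (PySem.List.enumerate ws s).foldl bTglStep acc = acc ++ togglesOf ws s := by
  induction ws generalizing s acc with
  | nil => simp [togglesOf, PySem.List.enumerate_nil]
  | cons w ws ih =>
    rw [PySem.List.enumerate_cons, List.foldl_cons, ih, togglesOf]
    simp only [bTglStep]
    split_ifs <;> simp

theorem togglesOf_length (ws : List String) (s : Int) : (togglesOf ws s).length = countTok ws := by
  induction ws generalizing s with
  | nil => rfl
  | cons w ws ih => simp only [togglesOf, countTok]; split_ifs <;> simp [ih] <;> omega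

theorem togglesOf_shift (ws : List String) (s : Int) :
    togglesOf ws (s + 1) = (togglesOf ws s).map (· + 1) := by
  induction ws generalizing s with
  | nil => rfl
  | cons w ws ih => simp only [togglesOf]; split_ifs <;> simp [ih]

theorem togglesOf_nonneg (ws : List String) (s p : Int) (hp : p ∈ togglesOf ws s) : s ≤ p := by
  induction ws generalizing s with
  | nil => simp [togglesOf] at hp
  | cons w ws ih =>
    simp only [togglesOf] at hp
    split_ifs at hp with h
    · rcases List.mem_cons.mp hp with rfl | hp'
      · omega
      · have := ih (s + 1) hp'; omega
    · have := ih (s + 1) hp; omega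

theorem enumerate_map (l : List Int) (f : Int → Int) (s : Int) :
    PySem.List.enumerate (l.map f) s = (PySem.List.enumerate l s).map (fun jp => (jp.1, f jp.2)) := by
  induction l generalizing s with
  | nil => simp [PySem.List.enumerate_nil]
  | cons x l ih => simp [PySem.List.enumerate_cons, ih]

theorem enumerate_shift (l : List Int) (s : Int) :
    PySem.List.enumerate l (s + 1) = (PySem.List.enumerate l s).map (fun jp => (jp.1 + 1, jp.2)) := by
  induction l generalizing s with
  | nil => simp [PySem.List.enumerate_nil]
  | cons x l ih => simp [PySem.List.enumerate_cons, ih]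

-- bit arithmetic: adding 2^t does not change bits below t, and is bit t itself
theorem bit_add_pow (t s r : Nat) (hs : s < t) : (2 ^ t + r) >>> s &&& 1 = r >>> s &&& 1 := by
  rw [Nat.and_one_is_mod, Nat.and_one_is_mod, Nat.shiftRight_eq_div_pow, Nat.shiftRight_eq_div_pow]
  obtain ⟨k, rfl⟩ : ∃ k, t = s + 1 + k := ⟨t - s - 1, by omega⟩
  have h2 : 2 ^ (s + 1 + k) + r = r + 2 * 2 ^ k * 2 ^ s := by ring
  rw [h2, Nat.add_mul_div_right _ _ (Nat.two_pow_pos s)]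
  omega

theorem bit_high (t r : Nat) (hr : r < 2 ^ t) : (2 ^ t + r) >>> t &&& 1 = 1 := by
  rw [Nat.and_one_is_mod, Nat.shiftRight_eq_div_pow]
  have h2 : 2 ^ t + r = r + 1 * 2 ^ t := by ring
  rw [h2, Nat.add_mul_div_right _ _ (Nat.two_pow_pos t),
      Nat.div_eq_of_lt hr]

theorem bit_low (t r : Nat) (hr : r < 2 ^ t) : r >>> t &&& 1 = 0 := by
  rw [Nat.and_one_is_mod, Nat.shiftRight_eq_div_pow, Nat.div_eq_of_lt hr]

-- shifting every loop index and t together changes nothing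
theorem foldl_bFlipStep_reindex (jps : List (Int × Int)) (cur : List String) (t mask : Int) :
    (jps.map (fun jp => (jp.1 + 1, jp.2))).foldl (bFlipStep (t + 1) mask) cur
      = jps.foldl (bFlipStep t mask) cur := by
  rw [List.foldl_map]
  have : (fun (c : List String) (jp : Int × Int) => bFlipStep (t + 1) mask c (jp.1 + 1, jp.2))
      = bFlipStep t mask := by
    funext c jp
    simp only [bFlipStep]
    have h : t + 1 - 1 - (jp.1 + 1) = t - 1 - jp.1 := by ring
    rw [h]
  rw [this]

-- shifting every position past a fixed head
theorem foldl_bFlipStep_pos (jps : List (Int × Int)) (x : String) (cur : List String)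
    (t mask : Int) (hpos : ∀ jp ∈ jps, 0 ≤ jp.2) :
    (jps.map (fun jp => (jp.1, jp.2 + 1))).foldl (bFlipStep t mask) (x :: cur)
      = x :: jps.foldl (bFlipStep t mask) cur := by
  induction jps generalizing cur with
  | nil => rfl
  | cons jp jps ih =>
    have hp : 0 ≤ jp.2 := hpos jp (List.mem_cons_self)
    have htn : (jp.2 + 1).toNat = jp.2.toNat + 1 := by omega
    have hget : PySem.List.pyGetD (x :: cur) (jp.2 + 1) "" = PySem.List.pyGetD cur jp.2 "" := by
      rw [PySem.List.pyGetD_of_nonneg _ _ (by omega), PySem.List.pyGetD_of_nonneg _ _ hp, htn]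
      rfl
    have hset : ∀ v, PySem.List.pySetD (x :: cur) (jp.2 + 1) v = x :: PySem.List.pySetD cur jp.2 v := by
      intro v
      rw [PySem.List.pySetD_of_nonneg _ _ (by omega), PySem.List.pySetD_of_nonneg _ _ hp, htn]
      rfl
    have hstep : bFlipStep t mask (x :: cur) (jp.1, jp.2 + 1) = x :: bFlipStep t mask cur jp := by
      simp only [bFlipStep, hget]
      split_ifs <;> simp [hset]
    rw [List.map_cons, List.foldl_cons, List.foldl_cons, hstep]
    exact ih _ (fun q hq => hpos q (List.mem_cons_of_mem _ hq))

theorem band_one_natCast (n : Nat) : PySem.Int.band ((n : Nat) : Int) 1 = ((n &&& 1 : Nat) : Int) := by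
  exact_mod_cast PySem.Int.band_natCast n 1

-- masks equal below bit t' give equal folds when all loop indices are below t'
theorem foldl_bFlipStep_maskdrop (t' : Nat) (r : Nat) (jps : List (Int × Int)) (cur : List String)
    (_hr : r < 2 ^ t') (hidx : ∀ jp ∈ jps, 0 ≤ jp.1 ∧ jp.1 < (t' : Int)) :
    jps.foldl (bFlipStep (t' : Int) (((2 ^ t' + r : Nat) : Int))) cur
      = jps.foldl (bFlipStep (t' : Int) ((r : Nat) : Int)) cur := by
  induction jps generalizing cur with
  | nil => rfl
  | cons jp jps ih =>
    have hj := hidx jp (List.mem_cons_self)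
    have hs : ((t' : Int) - 1 - jp.1).toNat < t' := by omega
    have hcond : PySem.Int.band ((((2 ^ t' + r : Nat) : Int)) >>> ((t' : Int) - 1 - jp.1).toNat) 1
        = PySem.Int.band (((r : Nat) : Int) >>> ((t' : Int) - 1 - jp.1).toNat) 1 := by
      have c1 : (((2 ^ t' + r : Nat) : Int)) >>> ((t' : Int) - 1 - jp.1).toNat
          = (((2 ^ t' + r) >>> ((t' : Int) - 1 - jp.1).toNat : Nat) : Int) := by simp
      have c2 : (((r : Nat) : Int)) >>> ((t' : Int) - 1 - jp.1).toNat
          = ((r >>> ((t' : Int) - 1 - jp.1).toNat : Nat) : Int) := by simp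
      rw [c1, c2, band_one_natCast, band_one_natCast, bit_add_pow _ _ _ hs]
    rw [List.foldl_cons, List.foldl_cons]
    simp only [bFlipStep, hcond]
    split_ifs
    all_goals exact ih _ (fun q hq => hidx q (List.mem_cons_of_mem _ hq))

-- the first loop step of B at a toggle head: bit t' of the mask decides the flip
theorem bFlip_head (t' m : Nat) (w : String) (ws : List String) :
    bFlipStep ((t' : Int) + 1) ((m : Nat) : Int) (w :: ws) (0, 0)
      = if m >>> t' &&& 1 = 1 then flipTok w :: ws else w :: ws := by
  have hsh : (((t' : Int)) + 1 - 1 - (0 : Int)).toNat = t' := by omega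
  have hcast : ((m : Nat) : Int) >>> t' = ((m >>> t' : Nat) : Int) := by simp
  by_cases hb : m >>> t' &&& 1 = 1
  · rw [if_pos hb]
    simp only [bFlipStep, hsh, hcast, band_one_natCast, hb]
    rw [if_pos (by simp), PySem.List.pyGetD_zero_cons, PySem.List.pySetD_of_nonneg _ _ le_rfl]
    simp [flipTok]
  · rw [if_neg hb]
    have hb0 : m >>> t' &&& 1 = 0 := by
      have := Nat.and_one_is_mod (m >>> t'); omega
    simp only [bFlipStep, hsh, hcast, band_one_natCast, hb0]
    simp

theorem map_snd_comp {α : Type} (ws : List String) (s : Int) (f : String → α) :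
    (PySem.List.enumerate ws s).map (fun iw => f iw.2) = ws.map f := by
  induction ws generalizing s with
  | nil => simp [PySem.List.enumerate_nil]
  | cons x l ih => simp [PySem.List.enumerate_cons, ih]

theorem pyRange_zero_natCast_map (n : Nat) :
    PySem.List.pyRange 0 ((n : Nat) : Int) 1 = (List.range n).map (fun k : Nat => (k : Int)) := by
  rw [PySem.List.pyRange_zero_nat]

theorem main_fold (ws : List String) :
    (List.range (2 ^ countTok ws)).map (fun m =>
      (PySem.List.enumerate (togglesOf ws 0) 0).foldl
        (bFlipStep ((countTok ws : Nat) : Int) ((m : Nat) : Int)) ws) = variants ws := by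
  induction ws with
  | nil => rfl
  | cons w ws ih =>
    have hlen := togglesOf_length ws 0
    have hpos : ∀ jp ∈ PySem.List.enumerate (togglesOf ws 0) 0, 0 ≤ jp.2 := by
      intro jp hjp
      rcases (PySem.List.mem_enumerate_iff _ _ _).mp hjp with ⟨k, hk, rfl⟩
      exact togglesOf_nonneg ws 0 _ (List.getElem_mem hk)
    have hidx : ∀ jp ∈ PySem.List.enumerate (togglesOf ws 0) 0,
        0 ≤ jp.1 ∧ jp.1 < ((countTok ws : Nat) : Int) := by
      intro jp hjp
      rcases (PySem.List.mem_enumerate_iff _ _ _).mp hjp with ⟨k, hk, rfl⟩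
      rw [hlen] at hk
      constructor <;> simp <;> omega
    by_cases htok : w = "and" ∨ w = "&"
    · -- toggle head
      have hcnt : countTok (w :: ws) = 1 + countTok ws := by simp [countTok, htok]
      have hE : PySem.List.enumerate (togglesOf (w :: ws) 0) 0
          = (0, 0) :: ((PySem.List.enumerate (togglesOf ws 0) 0).map
              (fun jp => (jp.1, jp.2 + 1))).map (fun jp => (jp.1 + 1, jp.2)) := by
        have htg : togglesOf (w :: ws) 0 = 0 :: (togglesOf ws 0).map (· + 1) := by
          rw [togglesOf, if_pos htok, togglesOf_shift]
        rw [htg, PySem.List.enumerate_cons, enumerate_shift, enumerate_map]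
      have tail_eq : ∀ (x : String) (M : Int),
          (((PySem.List.enumerate (togglesOf ws 0) 0).map (fun jp => (jp.1, jp.2 + 1))).map
              (fun jp => (jp.1 + 1, jp.2))).foldl
            (bFlipStep (((countTok ws : Nat) : Int) + 1) M) (x :: ws)
          = x :: (PySem.List.enumerate (togglesOf ws 0) 0).foldl
              (bFlipStep ((countTok ws : Nat) : Int) M) ws := by
        intro x M
        rw [foldl_bFlipStep_reindex, foldl_bFlipStep_pos _ _ _ _ _ hpos]
      have hcastT : ((countTok (w :: ws) : Nat) : Int) = ((countTok ws : Nat) : Int) + 1 := by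
        rw [hcnt]; push_cast; ring
      have hpow : 2 ^ countTok (w :: ws) = 2 ^ countTok ws + 2 ^ countTok ws := by
        rw [hcnt, pow_add, pow_one]; omega
      rw [hpow, List.range_add, List.map_append, List.map_map]
      have hvar : variants (w :: ws)
          = (variants ws).map (fun c => w :: c) ++ (variants ws).map (fun c => flipTok w :: c) := by
        rw [variants, if_pos htok]
      rw [hvar]
      congr 1
      · rw [← ih, List.map_map]
        apply List.map_congr_left
        intro m hm
        have hm' := List.mem_range.mp hm
        simp only [Function.comp]
        rw [hE, List.foldl_cons, hcastT, bFlip_head,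
            if_neg (by rw [bit_low _ _ hm']; omega), tail_eq]
      · rw [← ih, List.map_map]
        apply List.map_congr_left
        intro m hm
        have hm' := List.mem_range.mp hm
        simp only [Function.comp]
        rw [hE, List.foldl_cons, hcastT]
        have hmc : ((2 ^ countTok ws + m : Nat) : Int)
            = (((2 ^ countTok ws + m : Nat) : Nat) : Int) := rfl
        rw [hmc, bFlip_head, if_pos (bit_high _ _ hm'), tail_eq,
            foldl_bFlipStep_maskdrop _ _ _ _ hm' hidx]
    · -- non-toggle head
      have hcnt : countTok (w :: ws) = countTok ws := by simp [countTok, htok]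
      have hE : PySem.List.enumerate (togglesOf (w :: ws) 0) 0
          = (PySem.List.enumerate (togglesOf ws 0) 0).map (fun jp => (jp.1, jp.2 + 1)) := by
        have htg : togglesOf (w :: ws) 0 = (togglesOf ws 0).map (· + 1) := by
          rw [togglesOf, if_neg htok, togglesOf_shift]
        rw [htg, enumerate_map]
      have hvar : variants (w :: ws) = (variants ws).map (fun c => w :: c) := by
        rw [variants, if_neg htok]
      rw [hcnt, hE, hvar, ← ih, List.map_map]
      apply List.map_congr_left
      intro m hm
      simp only [Function.comp]
      rw [foldl_bFlipStep_pos _ _ _ _ _ hpos]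

-- ===== VERDICT (by name: the statement is the Claim_ definition above) =====
theorem generate_name_variations_spec : Claim_equal_generate_name_variations := by
  unfold Claim_equal_generate_name_variations
  intro show_name _
  unfold Spec_generate_name_variations generate_name_variations generate_name_variations_alt
  simp only []
  set ws := PySem.Str.split₀ (PySem.Str.lower show_name) with hws
  -- A's side
  rw [foldl_aVarStep, List.nil_append, List.map_map]
  have hA : (PySem.List.enumerate ws 0).map ((fun p : List String × Int => p.1) ∘
      (fun iw : Int × String => (tokOpts iw.2, iw.1))) = ws.map tokOpts :=
    map_snd_comp ws 0 tokOpts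
  rw [hA, pyProdA_map_tokOpts]
  -- B's side
  rw [foldl_bTglStep, List.nil_append]
  have ht : (PySem.List.len (togglesOf ws 0)).toNat = countTok ws := by
    rw [PySem.List.len_eq, togglesOf_length]; simp
  have htI : PySem.List.len (togglesOf ws 0) = ((countTok ws : Nat) : Int) := by
    rw [PySem.List.len_eq, togglesOf_length]
  have hpw : (2 : Int) ^ (PySem.List.len (togglesOf ws 0)).toNat
      = (((2 ^ countTok ws : Nat) : Nat) : Int) := by
    rw [ht]; push_cast; ring
  rw [hpw, pyRange_zero_natCast_map, List.map_map, htI, ← main_fold ws, List.map_map]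
  apply List.map_congr_left
  intro m hm
  rfl
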